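-- pv_equiv track=rewrite | github.com/pypi-data/pypi-mirror-16 | packages/mscript/mscript-1.0.0-py2.py3-none-any.whl/mscript/__init__.py | replace_reserved_words
-- ===== SOURCE A (Python) =====
-- reserved = [(" and ", " && "),  (" or ", " || "),  (" is not ", " !== "),  (" is ", " === "),  (" not like ", " != "),  (" like ", " == "),  (" not ", " !"),  (" unlike ", " != "),  ("None", "null"),  ("except", "catch"),  ("def", "function"),  ("#", "//")]
--
-- def tag_code(s):
-- 	code = []
-- 	is_string = False
-- 	string_char = ''
-- 	escaped = False
-- 	current_block = ""
-- 	for c in s: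
-- 		if is_string:
-- 			if not escaped and c == string_char:
-- 				code.append((current_block + c, "string"))
-- 				current_block = ""
-- 				is_string = False
-- 				continue
-- 			elif escaped:
-- 				escaped = False
-- 			elif c == "\\":
-- 				escaped = True
-- 			current_block = current_block +c
-- 		else:
-- 			if c == "\"":
-- 				string_char = "\""
-- 				code.append((current_block, "code"))
-- 				current_block = "\""
-- 				is_string = True
-- 			elif c == "\'":
-- 				string_char = "\'"
-- 				code.append((current_block, "code"))
-- 				current_block = "\'"
-- 				is_string = True
-- 			else:
-- 				current_block = current_block +c
-- 	code.append((current_block, "code"))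
-- 	return code
--
-- def replace_reserved_words(s_line):
-- 	tags = tag_code(s_line)
-- 	code_s = ""
-- 	for tag in tags:
-- 		text = tag[0]
-- 		if tag[1] == "code":
-- 			for rese in reserved:
-- 				text = text.replace(rese[0], rese[1])
-- 		code_s = code_s + text
-- 	return code_s
-- ===== SOURCE B (Python) =====
-- reserved = [(" and ", " && "),  (" or ", " || "),  (" is not ", " !== "),  (" is ", " === "),  (" not like ", " != "),  (" like ", " == "),  (" not ", " !"),  (" unlike ", " != "),  ("None", "null"),  ("except", "catch"),  ("def", "function"),  ("#", "//")]
--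
-- def _fix(code_text):
-- 	for old, new in reserved:
-- 		code_text = code_text.replace(old, new)
-- 	return code_text
--
-- def replace_reserved_words(s_line):
-- 	# index-jumping scanner: repeatedly locate the next quote and its matching
-- 	# close quote (skipping two chars after a backslash), splice by slicing;
-- 	# no per-character state machine with is_string/escaped flags.
-- 	out = []
-- 	s = s_line
-- 	while True:
-- 		n = len(s)
-- 		i = 0
-- 		while i < n and s[i] not in "\"'":
-- 			i += 1
-- 		if i == n:
-- 			out.append(_fix(s))
-- 			break
-- 		q = s[i]
-- 		j = i + 1
-- 		while j < n and s[j] != q: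
-- 			j += 2 if s[j] == "\\" else 1
-- 		if j >= n:
-- 			# unterminated string literal: treated as code, like the tail segment
-- 			out.append(_fix(s[:i]))
-- 			out.append(_fix(s[i:]))
-- 			break
-- 		out.append(_fix(s[:i]))
-- 		out.append(s[i:j + 1])
-- 		s = s[j + 1:]
-- 	return "".join(out)
-- ===== Notes on version B (the rewrite author's own statement) =====
-- stated objective: alternative
-- what changed: B replaces A's per-character is_string/escaped state machine and tagged-segment list by an index-jumping scanner that finds each open quote and its matching close quote (skipping two characters after a backslash) and splices the result from string slices.
import Mathlib
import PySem

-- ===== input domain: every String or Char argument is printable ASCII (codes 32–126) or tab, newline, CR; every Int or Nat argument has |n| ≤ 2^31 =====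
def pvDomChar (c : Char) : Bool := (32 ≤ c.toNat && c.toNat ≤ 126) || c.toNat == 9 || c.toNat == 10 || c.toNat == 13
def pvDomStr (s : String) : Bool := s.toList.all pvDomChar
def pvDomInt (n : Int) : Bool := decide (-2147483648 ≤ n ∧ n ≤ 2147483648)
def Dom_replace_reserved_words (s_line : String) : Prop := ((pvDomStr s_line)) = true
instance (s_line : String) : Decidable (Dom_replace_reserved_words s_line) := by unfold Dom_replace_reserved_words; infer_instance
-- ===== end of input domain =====

-- B replaces A's per-character state machine by an index-jumping quote scanner over slices (alternative; no speed claim).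

def pvReserved : List (String × String) :=
  [(" and ", " && "), (" or ", " || "), (" is not ", " !== "), (" is ", " === "),
   (" not like ", " != "), (" like ", " == "), (" not ", " !"), (" unlike ", " != "),
   ("None", "null"), ("except", "catch"), ("def", "function"), ("#", "//")]

-- the 12 ordered replacements applied to a code segment (A inlines this loop, B calls it as _fix)
def pvFix (t : String) : String :=
  pvReserved.foldl (fun t rese => PySem.Str.replace t rese.1 rese.2) t

-- ===== PORT A =====
-- tag_code's for-loop; buffers are carried as List Char (a Python str is its character
-- sequence); Python's string_char starts '' and is only read after being set, so it is
-- carried as a Char with an arbitrary initial value.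
def pvTagLoop (cs : List Char) (code : List (List Char × String)) (is_string : Bool)
    (string_char : Char) (escaped : Bool) (cur : List Char) : List (List Char × String) :=
  match cs with
  | [] => code ++ [(cur, "code")]
  | c :: rest =>
    if is_string then
      if !escaped && c == string_char then
        pvTagLoop rest (code ++ [(cur ++ [c], "string")]) false string_char escaped []
      else
        pvTagLoop rest code is_string string_char (if escaped then false else c == '\\') (cur ++ [c])
    else
      if c == '"' then
        pvTagLoop rest (code ++ [(cur, "code")]) true '"' escaped ['"']
      else if c == '\'' then
        pvTagLoop rest (code ++ [(cur, "code")]) true '\'' escaped ['\'']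
      else
        pvTagLoop rest code is_string string_char escaped (cur ++ [c])

def pvTagCode (s : String) : List (List Char × String) :=
  pvTagLoop s.toList [] false ' ' false []

def replace_reserved_words (s_line : String) : String :=
  let tags := pvTagCode s_line
  tags.foldl (fun code_s tag =>
    let text := String.ofList tag.1
    let text := if tag.2 == "code" then pvFix text else text
    code_s ++ text) ""

-- ===== PORT B =====
-- Source B's inner while-loop 'i += 1 until a quote': index of the first quote (= length if none)
def pvFindQuote : List Char → Nat
  | [] => 0
  | c :: rest => if c == '"' || c == '\'' then 0 else pvFindQuote rest + 1

-- Source B's close-quote scan 'j += 2 if backslash else 1'; offset of the closing quote, none if it runs off the end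
def pvFindClose (q : Char) : List Char → Option Nat
  | [] => none
  | c :: rest =>
    if c == q then some 0
    else if c == '\\' then
      match rest with
      | [] => none
      | _ :: rest' => (pvFindClose q rest').map (· + 2)
    else (pvFindClose q rest).map (· + 1)

-- Source B's outer while-loop, one iteration per string literal, splicing by slices
def pvAltGo (cs : List Char) : String :=
  match _hdq : cs.drop (pvFindQuote cs) with
  | [] => pvFix (String.ofList cs)
  | q :: rest =>
    match pvFindClose q rest with
    | none =>
        pvFix (String.ofList (cs.take (pvFindQuote cs))) ++ pvFix (String.ofList (q :: rest))
    | some k =>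
        pvFix (String.ofList (cs.take (pvFindQuote cs))) ++ String.ofList ((q :: rest).take (k + 2))
          ++ pvAltGo (rest.drop (k + 1))
termination_by cs.length
decreasing_by
  have h := congrArg List.length _hdq
  simp only [List.length_drop, List.length_cons] at h
  simp only [List.length_drop]
  omega

def replace_reserved_words_alt (s_line : String) : String :=
  pvAltGo s_line.toList

-- ===== PRECONDITION & SPEC =====
def Spec_replace_reserved_words (s_line : String) (out : String) : Prop := out = replace_reserved_words_alt s_line
instance (s_line : String) (out : String) : Decidable (Spec_replace_reserved_words s_line out) := by unfold Spec_replace_reserved_words; infer_instance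

-- ===== CLAIM (what is proved, stated in full; the proofs are below) =====
def Claim_equal_replace_reserved_words : Prop := ∀ (s_line : String), Dom_replace_reserved_words s_line → Spec_replace_reserved_words s_line (replace_reserved_words s_line)

-- ===== LEMMAS AND PROOFS =====

def pvRenderTag (tag : List Char × String) : String :=
  if tag.2 == "code" then pvFix (String.ofList tag.1) else String.ofList tag.1

def pvRender (l : List (List Char × String)) : String :=
  l.foldl (fun acc tag => acc ++ pvRenderTag tag) ""

theorem pvRender_append (l : List (List Char × String)) (t : List Char × String) :
    pvRender (l ++ [t]) = pvRender l ++ pvRenderTag t := by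
  simp only [pvRender, List.foldl_append, List.foldl_cons, List.foldl_nil]

theorem pvFindQuote_le (cs : List Char) : pvFindQuote cs ≤ cs.length := by
  induction cs with
  | nil => simp [pvFindQuote]
  | cons c rest ih => simp only [pvFindQuote, List.length_cons]; split <;> omega

-- no quote: A consumes everything into one code segment
theorem pvTag_noquote (cs : List Char) (code : List (List Char × String))
    (sc : Char) (esc : Bool) (cur : List Char)
    (h : pvFindQuote cs = cs.length) :
    pvTagLoop cs code false sc esc cur = code ++ [(cur ++ cs, "code")] := by
  induction cs generalizing code cur with
  | nil => simp [pvTagLoop]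
  | cons c rest ih =>
    simp only [pvFindQuote, List.length_cons] at h
    by_cases hq : (c == '"' || c == '\'') = true
    · rw [if_pos hq] at h; omega
    · have h1 : (c == '"') = false := by
        cases hcb : (c == '"') <;> simp_all
      have h2 : (c == '\'') = false := by
        cases hcb : (c == '\'') <;> simp_all
      simp only [pvTagLoop, h1, h2, Bool.false_eq_true, if_false]
      rw [if_neg hq] at h
      rw [ih _ _ (by omega)]
      simp

-- quote at index i: A flushes the code prefix and enters string mode
theorem pvTag_quote (cs : List Char) (code : List (List Char × String))
    (sc : Char) (esc : Bool) (cur : List Char)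
    (hi : pvFindQuote cs < cs.length) :
    pvTagLoop cs code false sc esc cur =
      pvTagLoop (cs.drop (pvFindQuote cs + 1))
        (code ++ [(cur ++ cs.take (pvFindQuote cs), "code")])
        true (cs.get ⟨pvFindQuote cs, hi⟩) esc [cs.get ⟨pvFindQuote cs, hi⟩] := by
  induction cs generalizing code cur with
  | nil => simp at hi
  | cons c rest ih =>
    by_cases hq : (c == '"' || c == '\'') = true
    · have hi0 : pvFindQuote (c :: rest) = 0 := by simp [pvFindQuote, hq]
      rcases Bool.or_eq_true_iff.mp hq with h1 | h1
      · have hc : c = '"' := by simpa using h1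
        subst hc
        simp [pvTagLoop, hi0]
      · have hc : c = '\'' := by simpa using h1
        subst hc
        simp [pvTagLoop, hi0]
    · have h1 : (c == '"') = false := by cases hcb : (c == '"') <;> simp_all
      have h2 : (c == '\'') = false := by cases hcb : (c == '\'') <;> simp_all
      have hfq : pvFindQuote (c :: rest) = pvFindQuote rest + 1 := by
        simp [pvFindQuote, h1, h2]
      have hi' : pvFindQuote rest < rest.length := by
        simp only [hfq, List.length_cons] at hi; omega
      simp only [pvTagLoop, h1, h2, Bool.false_eq_true, if_false]
      rw [ih _ _ hi']
      simp [hfq]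

-- string mode, closing quote found at offset k
theorem pvTag_close (q : Char) (cs : List Char) (k : Nat)
    (code : List (List Char × String)) (cur : List Char)
    (h : pvFindClose q cs = some k) :
    pvTagLoop cs code true q false cur =
      pvTagLoop (cs.drop (k + 1)) (code ++ [(cur ++ cs.take (k + 1), "string")]) false q false [] := by
  induction cs using pvFindClose.induct q generalizing k code cur with
  | case1 => rw [pvFindClose.eq_def] at h; simp at h
  | case2 c rest hq =>
    rw [pvFindClose.eq_def] at h; simp only [hq] at h
    cases h
    simp [pvTagLoop, hq]
  | case3 c hq hb =>
    have hcq : (c == q) = false := by simpa using hq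
    rw [pvFindClose.eq_def] at h; simp [hcq, hb] at h
  | case4 c hq hb c2 rest' ih =>
    have hcq : (c == q) = false := by simpa using hq
    rw [pvFindClose.eq_def] at h
    simp only [hcq, hb, Bool.false_eq_true, if_false, if_true, Option.map_eq_some_iff] at h
    obtain ⟨k', hk', rfl⟩ := h
    simp only [pvTagLoop, hcq, Bool.not_false, Bool.true_and, Bool.false_eq_true, if_false,
      if_true, hb]
    have hstep : ((!true && c2 == q) = false) := by simp
    simp only [hstep, Bool.false_eq_true, if_false]
    rw [ih _ _ _ hk']
    simp
  | case5 c rest hq hb ih =>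
    have hcq : (c == q) = false := by simpa using hq
    have hcb : (c == '\\') = false := by simpa using hb
    rw [pvFindClose.eq_def] at h
    simp only [hcq, hcb, Bool.false_eq_true, if_false, Option.map_eq_some_iff] at h
    obtain ⟨k', hk', rfl⟩ := h
    simp only [pvTagLoop, hcq, Bool.not_false, Bool.true_and, Bool.false_eq_true, if_false, hcb]
    rw [ih _ _ _ hk']
    simp

-- string mode, never closed: everything left becomes the final "code" segment
theorem pvTag_noclose (q : Char) (cs : List Char)
    (code : List (List Char × String)) (cur : List Char)
    (h : pvFindClose q cs = none) :
    pvTagLoop cs code true q false cur = code ++ [(cur ++ cs, "code")] := by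
  induction cs using pvFindClose.induct q generalizing code cur with
  | case1 => simp [pvTagLoop]
  | case2 c rest hq => rw [pvFindClose.eq_def] at h; simp [hq] at h
  | case3 c hq hb =>
    have hcq : (c == q) = false := by simpa using hq
    simp only [pvTagLoop, hcq, Bool.not_false, Bool.true_and, Bool.false_eq_true, if_false]
    simp
  | case4 c hq hb c2 rest' ih =>
    have hcq : (c == q) = false := by simpa using hq
    rw [pvFindClose.eq_def] at h
    simp only [hcq, hb, Bool.false_eq_true, if_false, if_true, Option.map_eq_none_iff] at h
    simp only [pvTagLoop, hcq, Bool.not_false, Bool.true_and, Bool.false_eq_true, if_false,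
      if_true, hb]
    have hstep : ((!true && c2 == q) = false) := by simp
    simp only [hstep, Bool.false_eq_true, if_false]
    rw [ih _ _ h]
    simp
  | case5 c rest hq hb ih =>
    have hcq : (c == q) = false := by simpa using hq
    have hcb : (c == '\\') = false := by simpa using hb
    rw [pvFindClose.eq_def] at h
    simp only [hcq, hcb, Bool.false_eq_true, if_false, Option.map_eq_none_iff] at h
    simp only [pvTagLoop, hcq, Bool.not_false, Bool.true_and, Bool.false_eq_true, if_false, hcb]
    rw [ih _ _ h]
    simp

theorem pvFindClose_lt_length (q : Char) (cs : List Char) (k : Nat)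
    (h : pvFindClose q cs = some k) : k < cs.length := by
  induction cs using pvFindClose.induct q generalizing k with
  | case1 => rw [pvFindClose.eq_def] at h; simp at h
  | case2 c rest hq => rw [pvFindClose.eq_def] at h; simp only [hq] at h; cases h; simp
  | case3 c hq hb =>
    have hcq : (c == q) = false := by simpa using hq
    rw [pvFindClose.eq_def] at h; simp [hcq, hb] at h
  | case4 c hq hb c2 rest' ih =>
    have hcq : (c == q) = false := by simpa using hq
    rw [pvFindClose.eq_def] at h
    simp only [hcq, hb, Bool.false_eq_true, if_false, if_true, Option.map_eq_some_iff] at h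
    obtain ⟨k', hk', rfl⟩ := h
    have := ih _ hk'
    simp only [List.length_cons]; omega
  | case5 c rest hq hb ih =>
    have hcq : (c == q) = false := by simpa using hq
    have hcb : (c == '\\') = false := by simpa using hb
    rw [pvFindClose.eq_def] at h
    simp only [hcq, hcb, Bool.false_eq_true, if_false, Option.map_eq_some_iff] at h
    obtain ⟨k', hk', rfl⟩ := h
    have := ih _ hk'
    simp only [List.length_cons]; omega

theorem pvDropTail (cs : List Char) (i : Nat) (q : Char) (rest : List Char)
    (hdq : cs.drop i = q :: rest) : cs.drop (i + 1) = rest := by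
  have : cs.drop (i + 1) = (cs.drop i).drop 1 := by rw [List.drop_drop, Nat.add_comm]
  rw [this, hdq, List.drop_one, List.tail_cons]

theorem pvMain (n : Nat) : ∀ (cs : List Char), cs.length ≤ n →
    ∀ (code : List (List Char × String)) (sc : Char),
    pvRender (pvTagLoop cs code false sc false []) = pvRender code ++ pvAltGo cs := by
  induction n with
  | zero =>
    intro cs hn code sc
    have : cs = [] := List.length_eq_zero_iff.mp (Nat.le_zero.mp hn)
    subst this
    simp [pvTagLoop, pvAltGo, pvFindQuote, pvRender_append, pvRenderTag]
  | succ n ih =>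
    intro cs hn code sc
    rw [pvAltGo.eq_def]
    split
    · -- no quote: cs.drop i = []
      rename_i hdq
      have hlen := congrArg List.length hdq
      simp only [List.length_drop, List.length_nil] at hlen
      have heq : pvFindQuote cs = cs.length := by
        have := pvFindQuote_le cs; omega
      rw [pvTag_noquote cs code sc false [] heq, pvRender_append]
      simp [pvRenderTag]
    · -- quote found: cs.drop i = q :: rest
      rename_i q rest hdq
      have hlen := congrArg List.length hdq
      simp only [List.length_drop, List.length_cons] at hlen
      have hi : pvFindQuote cs < cs.length := by omega
      have hget : cs.get ⟨pvFindQuote cs, hi⟩ = q := by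
        have hcd := List.getElem_cons_drop hi
        rw [hdq] at hcd
        simp only [List.cons.injEq] at hcd
        simp [hcd.1]
      have hdrop1 : cs.drop (pvFindQuote cs + 1) = rest := pvDropTail cs _ q rest hdq
      rw [pvTag_quote cs code sc false [] hi, hget, hdrop1]
      cases hcl : pvFindClose q rest with
      | none =>
        rw [pvTag_noclose q _ _ _ hcl, pvRender_append, pvRender_append]
        simp [pvRenderTag, String.append_assoc]
      | some k =>
        rw [pvTag_close q _ k _ _ hcl]
        have hk : k < rest.length := pvFindClose_lt_length q _ k hcl
        rw [ih (rest.drop (k + 1)) (by simp only [List.length_drop]; omega)]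
        rw [pvRender_append, pvRender_append]
        have hss : (("string" : String) == "code") = false := by decide
        simp only [pvRenderTag, hss, Bool.false_eq_true, if_false, List.nil_append]
        simp [String.ofList, String.append_assoc]

-- ===== VERDICT (by name: the statement is the Claim_ definition above) =====
theorem replace_reserved_words_spec : Claim_equal_replace_reserved_words := by
  intro s _
  unfold Spec_replace_reserved_words replace_reserved_words replace_reserved_words_alt pvTagCode
  have := pvMain s.toList.length s.toList le_rfl [] ' '
  simpa [pvRender, pvRenderTag] using this
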